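-- pv_equiv track=rewrite | github.com/markusstrasser/meta | scripts/session_store.py | classify_session_kind
-- ===== SOURCE A (Python) =====
-- def classify_session_kind(first_message: str | None) -> str:
--     text = (first_message or "").lower()
--     if not text:
--         return "unclassified"
--     if any(token in text for token in (
--         "hook", "fix", "broken", "stale", "cleanup", "debug", "error",
--         "fail", "doctor", "health", "config", "settings", "update claude",
--         "update memory", "orchestrator", "launchd", "plist",
--     )):
--         return "maintenance"
--     if any(token in text for token in (
--         "research", "paper", "literature", "evidence", "investigate",
--         "search for", "what do we know",
--     )):
--         return "research"
--     if any(token in text for token in (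
--         "review", "retro", "session-analyst", "design-review",
--         "model-review", "audit",
--     )):
--         return "review"
--     if any(token in text for token in (
--         "build", "implement", "add", "create", "write", "new skill", "new hook",
--     )):
--         return "feature"
--     if any(token in text for token in (
--         "plan", "propose", "strategy", "architecture", "refactor",
--     )):
--         return "planning"
--     return "other"
-- ===== SOURCE B (Python) =====
-- _KINDS = ("maintenance", "research", "review", "feature", "planning")
--
-- _TOKEN_SETS = (
--     ("hook", "fix", "broken", "stale", "cleanup", "debug", "error",
--      "fail", "doctor", "health", "config", "settings", "update claude",
--      "update memory", "orchestrator", "launchd", "plist"),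
--     ("research", "paper", "literature", "evidence", "investigate",
--      "search for", "what do we know"),
--     ("review", "retro", "session-analyst", "design-review",
--      "model-review", "audit"),
--     ("build", "implement", "add", "create", "write", "new skill", "new hook"),
--     ("plan", "propose", "strategy", "architecture", "refactor"),
-- )
--
-- # flat multi-pattern table: (token, priority of its kind)
-- _TOKENS = [(tok, pri) for pri, toks in enumerate(_TOKEN_SETS) for tok in toks]
--
--
-- def classify_session_kind(first_message: str | None) -> str:
--     text = (first_message or "").lower()
--     if not text:
--         return "unclassified"
--     # single left-to-right scan over text positions, keeping the best
--     # (lowest) priority of any token that starts at some position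
--     best = len(_KINDS)
--     for i in range(len(text)):
--         for tok, pri in _TOKENS:
--             if pri < best and text.startswith(tok, i):
--                 best = pri
--     return _KINDS[best] if best < len(_KINDS) else "other"
-- ===== Notes on version B (the rewrite author's own statement) =====
-- stated objective: alternative
-- what changed: Replaces A's token-driven chain of five any(token in text) branches by a text-position-driven multi-pattern scan: one pass over the text positions checks a flat (token, priority) table via startswith and keeps the minimum priority matched, then a final table lookup maps that priority to the kind.
import Mathlib
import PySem

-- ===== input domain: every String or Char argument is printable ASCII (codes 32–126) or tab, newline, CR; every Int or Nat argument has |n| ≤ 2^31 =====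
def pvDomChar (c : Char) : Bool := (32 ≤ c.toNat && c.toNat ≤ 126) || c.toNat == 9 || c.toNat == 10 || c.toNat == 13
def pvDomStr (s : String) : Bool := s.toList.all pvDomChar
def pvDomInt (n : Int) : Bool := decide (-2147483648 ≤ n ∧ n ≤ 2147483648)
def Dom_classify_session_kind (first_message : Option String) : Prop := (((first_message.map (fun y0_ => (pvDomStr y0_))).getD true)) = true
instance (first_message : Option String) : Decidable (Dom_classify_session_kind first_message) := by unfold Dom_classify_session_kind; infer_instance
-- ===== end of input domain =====

-- B replaces A's token-driven chain of any(token in text) branches by a text-position-driven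
-- multi-pattern scan keeping the minimum matched priority (objective: alternative, same cost).

-- ===== PORT A =====
def classify_session_kind (first_message : Option String) : String :=
  let text := PySem.Str.lower (first_message.getD "")
  if text = "" then "unclassified"
  else if ([ "hook", "fix", "broken", "stale", "cleanup", "debug", "error",
             "fail", "doctor", "health", "config", "settings", "update claude",
             "update memory", "orchestrator", "launchd", "plist"
           ] : List String).any (fun token => PySem.Str.isIn token text) then "maintenance"
  else if ([ "research", "paper", "literature", "evidence", "investigate",
             "search for", "what do we know"
           ] : List String).any (fun token => PySem.Str.isIn token text) then "research"
  else if ([ "review", "retro", "session-analyst", "design-review",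
             "model-review", "audit"
           ] : List String).any (fun token => PySem.Str.isIn token text) then "review"
  else if ([ "build", "implement", "add", "create", "write", "new skill", "new hook"
           ] : List String).any (fun token => PySem.Str.isIn token text) then "feature"
  else if ([ "plan", "propose", "strategy", "architecture", "refactor"
           ] : List String).any (fun token => PySem.Str.isIn token text) then "planning"
  else "other"

-- ===== PORT B =====
def csk_kinds : List String := ["maintenance", "research", "review", "feature", "planning"]

def csk_r0 : List String :=
  [ "hook", "fix", "broken", "stale", "cleanup", "debug", "error",
    "fail", "doctor", "health", "config", "settings", "update claude",
    "update memory", "orchestrator", "launchd", "plist" ]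
def csk_r1 : List String :=
  [ "research", "paper", "literature", "evidence", "investigate",
    "search for", "what do we know" ]
def csk_r2 : List String :=
  [ "review", "retro", "session-analyst", "design-review",
    "model-review", "audit" ]
def csk_r3 : List String :=
  [ "build", "implement", "add", "create", "write", "new skill", "new hook" ]
def csk_r4 : List String :=
  [ "plan", "propose", "strategy", "architecture", "refactor" ]

-- Source B's _TOKENS comprehension: flat (token, priority) table in rule order
def csk_tokens : List (String × Nat) :=
  csk_r0.map (fun t => (t, 0)) ++ csk_r1.map (fun t => (t, 1)) ++ csk_r2.map (fun t => (t, 2)) ++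
  csk_r3.map (fun t => (t, 3)) ++ csk_r4.map (fun t => (t, 4))

-- Source B's double loop: for i in range(len(text)): for tok, pri in _TOKENS: if pri < best and
-- text.startswith(tok, i): best = pri  (startswith(tok, i) is exactly 'tok prefix of drop i')
def csk_scan (cs : List Char) : Nat :=
  (List.range cs.length).foldl
    (fun best i =>
      csk_tokens.foldl
        (fun b tp => if tp.2 < b ∧ tp.1.toList <+: cs.drop i then tp.2 else b) best)
    5

def classify_session_kind_alt (first_message : Option String) : String :=
  let text := PySem.Str.lower (first_message.getD "")
  if text = "" then "unclassified"
  else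
    let best := csk_scan text.toList
    if best < 5 then csk_kinds.getD best "other" else "other"

-- ===== PRECONDITION & SPEC =====
def Spec_classify_session_kind (first_message : Option String) (out : String) : Prop := out = classify_session_kind_alt first_message
instance (first_message : Option String) (out : String) : Decidable (Spec_classify_session_kind first_message out) := by unfold Spec_classify_session_kind; infer_instance

-- ===== CLAIM (what is proved, stated in full; the proofs are below) =====
def Claim_equal_classify_session_kind : Prop := ∀ (first_message : Option String), Dom_classify_session_kind first_message → Spec_classify_session_kind first_message (classify_session_kind first_message)

-- ===== LEMMAS AND PROOFS =====

-- the inner (token) fold never increases the accumulator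
theorem csk_innerFold_le (d : List Char) (l : List (String × Nat)) (b : Nat) :
    l.foldl (fun b tp => if tp.2 < b ∧ tp.1.toList <+: d then tp.2 else b) b ≤ b := by
  induction l generalizing b with
  | nil => exact le_rfl
  | cons tp l ih =>
      simp only [List.foldl_cons]
      refine le_trans (ih _) ?_
      split_ifs with h
      · exact le_of_lt h.1
      · exact le_rfl

-- any token of the list that matches bounds the inner fold's result
theorem csk_innerFold_le_mem (d : List Char) (l : List (String × Nat)) (b : Nat)
    (tp : String × Nat) (hm : tp ∈ l) (hp : tp.1.toList <+: d) :
    l.foldl (fun b tp => if tp.2 < b ∧ tp.1.toList <+: d then tp.2 else b) b ≤ tp.2 := by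
  induction l generalizing b with
  | nil => cases hm
  | cons hd l ih =>
      simp only [List.foldl_cons]
      rcases List.mem_cons.mp hm with h | h
      · subst h
        split_ifs with hc
        · exact csk_innerFold_le d l tp.2
        · have hble : b ≤ tp.2 := by
            rcases Nat.lt_or_ge tp.2 b with hlt | hge
            · exact absurd ⟨hlt, hp⟩ hc
            · exact hge
          exact le_trans (csk_innerFold_le d l b) hble
      · split_ifs <;> exact ih _ h

-- the inner fold either returns its input or the priority of some matching token
theorem csk_innerFold_cases (d : List Char) (l : List (String × Nat)) (b : Nat) :
    l.foldl (fun b tp => if tp.2 < b ∧ tp.1.toList <+: d then tp.2 else b) b = b ∨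
    ∃ tp ∈ l, tp.1.toList <+: d ∧
      l.foldl (fun b tp => if tp.2 < b ∧ tp.1.toList <+: d then tp.2 else b) b = tp.2 := by
  induction l generalizing b with
  | nil => left; rfl
  | cons hd l ih =>
      simp only [List.foldl_cons]
      split_ifs with hc
      · rcases ih hd.2 with h | ⟨tp, htp, hpre, heq⟩
        · exact Or.inr ⟨hd, List.mem_cons_self, hc.2, h⟩
        · exact Or.inr ⟨tp, List.mem_cons_of_mem _ htp, hpre, heq⟩
      · rcases ih b with h | ⟨tp, htp, hpre, heq⟩
        · exact Or.inl h
        · exact Or.inr ⟨tp, List.mem_cons_of_mem _ htp, hpre, heq⟩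

-- csk_scan restated over an arbitrary index list (to induct)
def csk_outer (cs : List Char) : List Nat → Nat → Nat
  | [], b => b
  | j :: idxs, b =>
      csk_outer cs idxs
        (csk_tokens.foldl
          (fun b tp => if tp.2 < b ∧ tp.1.toList <+: cs.drop j then tp.2 else b) b)

theorem csk_outer_cons (cs : List Char) (j : Nat) (idxs : List Nat) (b : Nat) :
    csk_outer cs (j :: idxs) b =
    csk_outer cs idxs
      (csk_tokens.foldl
        (fun b tp => if tp.2 < b ∧ tp.1.toList <+: cs.drop j then tp.2 else b) b) := by
  simp [csk_outer]

theorem csk_outer_eq_foldl (cs : List Char) (idxs : List Nat) (b : Nat) :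
    csk_outer cs idxs b =
    idxs.foldl
      (fun best i =>
        csk_tokens.foldl
          (fun b tp => if tp.2 < b ∧ tp.1.toList <+: cs.drop i then tp.2 else b) best) b := by
  induction idxs generalizing b with
  | nil => rfl
  | cons j idxs ih => rw [csk_outer_cons, List.foldl_cons, ih]

theorem csk_outer_le (cs : List Char) (idxs : List Nat) (b : Nat) : csk_outer cs idxs b ≤ b := by
  induction idxs generalizing b with
  | nil => exact le_rfl
  | cons j idxs ih =>
      rw [csk_outer_cons]
      exact le_trans (ih _) (csk_innerFold_le _ _ _)

theorem csk_outer_le_mem (cs : List Char) (idxs : List Nat) (i : Nat) (hi : i ∈ idxs)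
    (tp : String × Nat) (hm : tp ∈ csk_tokens) (hp : tp.1.toList <+: cs.drop i) (b : Nat) :
    csk_outer cs idxs b ≤ tp.2 := by
  induction idxs generalizing b with
  | nil => cases hi
  | cons j idxs ih =>
      rw [csk_outer_cons]
      rcases List.mem_cons.mp hi with h | h
      · subst h
        exact le_trans (csk_outer_le cs idxs _) (csk_innerFold_le_mem _ _ _ tp hm hp)
      · exact ih h _

theorem csk_outer_cases (cs : List Char) (idxs : List Nat) (b : Nat) :
    csk_outer cs idxs b = b ∨
    ∃ i ∈ idxs, ∃ tp ∈ csk_tokens, tp.1.toList <+: cs.drop i ∧ csk_outer cs idxs b = tp.2 := by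
  induction idxs generalizing b with
  | nil => left; rfl
  | cons j idxs ih =>
      rw [csk_outer_cons]
      rcases ih (csk_tokens.foldl
          (fun b tp => if tp.2 < b ∧ tp.1.toList <+: cs.drop j then tp.2 else b) b) with
        h | ⟨i, hi, tp, hm, hp, heq⟩
      · rcases csk_innerFold_cases (cs.drop j) csk_tokens b with h2 | ⟨tp, hm, hp, h2⟩
        · left; rw [h, h2]
        · right; exact ⟨j, List.mem_cons_self, tp, hm, hp, by rw [h, h2]⟩
      · right; exact ⟨i, List.mem_cons_of_mem _ hi, tp, hm, hp, heq⟩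

-- a (priority k) rule token matches somewhere in the text
def CskMatch (cs : List Char) (k : Nat) : Prop :=
  ∃ i, i < cs.length ∧ ∃ tp ∈ csk_tokens, tp.2 = k ∧ tp.1.toList <+: cs.drop i

theorem csk_scan_eq_outer (cs : List Char) :
    csk_scan cs = csk_outer cs (List.range cs.length) 5 :=
  (csk_outer_eq_foldl cs (List.range cs.length) 5).symm

theorem csk_scan_le (cs : List Char) : csk_scan cs ≤ 5 := by
  rw [csk_scan_eq_outer]; exact csk_outer_le _ _ _

theorem csk_scan_le_of_match (cs : List Char) (k : Nat) (h : CskMatch cs k) :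
    csk_scan cs ≤ k := by
  obtain ⟨i, hi, tp, hm, hk, hp⟩ := h
  rw [csk_scan_eq_outer]
  have := csk_outer_le_mem cs (List.range cs.length) i (List.mem_range.mpr hi) tp hm hp 5
  omega

theorem csk_scan_cases (cs : List Char) :
    csk_scan cs = 5 ∨ CskMatch cs (csk_scan cs) := by
  rw [csk_scan_eq_outer]
  rcases csk_outer_cases cs (List.range cs.length) 5 with h | ⟨i, hi, tp, hm, hp, heq⟩
  · exact Or.inl h
  · exact Or.inr ⟨i, List.mem_range.mp hi, tp, hm, heq.symm, hp⟩

-- A's any-token-in-text test, in terms of prefixes of suffixes (tokens are nonempty)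
theorem csk_any_iff (text : String) (rule : List String)
    (hne : ∀ t ∈ rule, t.toList ≠ []) :
    (rule.any (fun token => PySem.Str.isIn token text) = true) ↔
    ∃ i, i < text.toList.length ∧ ∃ t ∈ rule, t.toList <+: text.toList.drop i := by
  simp only [List.any_eq_true]
  constructor
  · rintro ⟨t, ht, hin⟩
    rw [PySem.Str.isIn_eq] at hin
    obtain ⟨j, hj⟩ := (PySem.Chars.exists_prefix_drop_iff_isIn _ _).mpr hin
    have hjlt : j < text.toList.length := by
      by_contra h
      have hnil : text.toList.drop j = [] := List.drop_eq_nil_iff.mpr (by omega)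
      rw [hnil] at hj
      exact hne t ht (List.prefix_nil.mp hj)
    exact ⟨j, hjlt, t, ht, hj⟩
  · rintro ⟨i, _, t, ht, hp⟩
    refine ⟨t, ht, ?_⟩
    rw [PySem.Str.isIn_eq]
    exact (PySem.Chars.exists_prefix_drop_iff_isIn _ _).mp ⟨i, hp⟩

theorem csk_mem_tokens (t : String) (k : Nat) :
    (t, k) ∈ csk_tokens ↔
    (k = 0 ∧ t ∈ csk_r0) ∨ (k = 1 ∧ t ∈ csk_r1) ∨ (k = 2 ∧ t ∈ csk_r2) ∨
    (k = 3 ∧ t ∈ csk_r3) ∨ (k = 4 ∧ t ∈ csk_r4) := by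
  simp only [csk_tokens, List.mem_append, List.mem_map, Prod.mk.injEq]
  constructor
  · rintro ((((⟨a, ha, h1, h2⟩ | ⟨a, ha, h1, h2⟩) | ⟨a, ha, h1, h2⟩) | ⟨a, ha, h1, h2⟩) |
        ⟨a, ha, h1, h2⟩)
    · subst h1; subst h2; exact Or.inl ⟨rfl, ha⟩
    · subst h1; subst h2; exact Or.inr (Or.inl ⟨rfl, ha⟩)
    · subst h1; subst h2; exact Or.inr (Or.inr (Or.inl ⟨rfl, ha⟩))
    · subst h1; subst h2; exact Or.inr (Or.inr (Or.inr (Or.inl ⟨rfl, ha⟩)))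
    · subst h1; subst h2; exact Or.inr (Or.inr (Or.inr (Or.inr ⟨rfl, ha⟩)))
  · rintro (⟨rfl, ht⟩ | ⟨rfl, ht⟩ | ⟨rfl, ht⟩ | ⟨rfl, ht⟩ | ⟨rfl, ht⟩)
    · exact Or.inl (Or.inl (Or.inl (Or.inl ⟨t, ht, rfl, rfl⟩)))
    · exact Or.inl (Or.inl (Or.inl (Or.inr ⟨t, ht, rfl, rfl⟩)))
    · exact Or.inl (Or.inl (Or.inr ⟨t, ht, rfl, rfl⟩))
    · exact Or.inl (Or.inr ⟨t, ht, rfl, rfl⟩)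
    · exact Or.inr ⟨t, ht, rfl, rfl⟩

def csk_ruleOf (k : Nat) : List String :=
  [csk_r0, csk_r1, csk_r2, csk_r3, csk_r4].getD k []

theorem csk_match_iff_any (text : String) (k : Nat) (hk : k < 5) :
    CskMatch text.toList k ↔
    ((csk_ruleOf k).any (fun token => PySem.Str.isIn token text) = true) := by
  have hne : ∀ t ∈ csk_ruleOf k, t.toList ≠ [] := by
    interval_cases k <;> decide
  rw [csk_any_iff text _ hne]
  unfold CskMatch
  constructor
  · rintro ⟨i, hi, ⟨t, p⟩, hm, hp, hpre⟩
    refine ⟨i, hi, t, ?_, hpre⟩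
    replace hp : p = k := hp
    subst hp
    rcases (csk_mem_tokens t p).mp hm with ⟨h, ht⟩ | ⟨h, ht⟩ | ⟨h, ht⟩ | ⟨h, ht⟩ | ⟨h, ht⟩ <;>
      subst h <;> exact ht
  · rintro ⟨i, hi, t, ht, hpre⟩
    refine ⟨i, hi, (t, k), ?_, rfl, hpre⟩
    rw [csk_mem_tokens]
    interval_cases k
    · exact Or.inl ⟨rfl, ht⟩
    · exact Or.inr (Or.inl ⟨rfl, ht⟩)
    · exact Or.inr (Or.inr (Or.inl ⟨rfl, ht⟩))
    · exact Or.inr (Or.inr (Or.inr (Or.inl ⟨rfl, ht⟩)))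
    · exact Or.inr (Or.inr (Or.inr (Or.inr ⟨rfl, ht⟩)))

-- the five-branch chain equals B's min-priority lookup
theorem csk_chain_eq (text : String) :
    (if ((csk_ruleOf 0).any (fun token => PySem.Str.isIn token text)) = true then "maintenance"
     else if ((csk_ruleOf 1).any (fun token => PySem.Str.isIn token text)) = true then "research"
     else if ((csk_ruleOf 2).any (fun token => PySem.Str.isIn token text)) = true then "review"
     else if ((csk_ruleOf 3).any (fun token => PySem.Str.isIn token text)) = true then "feature"
     else if ((csk_ruleOf 4).any (fun token => PySem.Str.isIn token text)) = true then "planning"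
     else "other")
    = (if csk_scan text.toList < 5 then csk_kinds.getD (csk_scan text.toList) "other"
       else "other") := by
  have hscan5 := csk_scan_le text.toList
  have hcases := csk_scan_cases text.toList
  by_cases m0 : ((csk_ruleOf 0).any (fun token => PySem.Str.isIn token text)) = true
  · have hle := csk_scan_le_of_match _ _ ((csk_match_iff_any text 0 (by omega)).mpr m0)
    have hb : csk_scan text.toList = 0 := by omega
    rw [if_pos m0, hb]
    rfl
  · rw [if_neg m0]
    have hne0 : csk_scan text.toList ≠ 0 := fun h0' => m0 <| by
      rcases hcases with h | h
      · omega
      · exact (csk_match_iff_any text 0 (by omega)).mp (h0' ▸ h)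
    by_cases m1 : ((csk_ruleOf 1).any (fun token => PySem.Str.isIn token text)) = true
    · have hle := csk_scan_le_of_match _ _ ((csk_match_iff_any text 1 (by omega)).mpr m1)
      have hb : csk_scan text.toList = 1 := by omega
      rw [if_pos m1, hb]
      rfl
    · rw [if_neg m1]
      have hne1 : csk_scan text.toList ≠ 1 := fun h1' => m1 <| by
        rcases hcases with h | h
        · omega
        · exact (csk_match_iff_any text 1 (by omega)).mp (h1' ▸ h)
      by_cases m2 : ((csk_ruleOf 2).any (fun token => PySem.Str.isIn token text)) = true
      · have hle := csk_scan_le_of_match _ _ ((csk_match_iff_any text 2 (by omega)).mpr m2)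
        have hb : csk_scan text.toList = 2 := by omega
        rw [if_pos m2, hb]
        rfl
      · rw [if_neg m2]
        have hne2 : csk_scan text.toList ≠ 2 := fun h2' => m2 <| by
          rcases hcases with h | h
          · omega
          · exact (csk_match_iff_any text 2 (by omega)).mp (h2' ▸ h)
        by_cases m3 : ((csk_ruleOf 3).any (fun token => PySem.Str.isIn token text)) = true
        · have hle := csk_scan_le_of_match _ _ ((csk_match_iff_any text 3 (by omega)).mpr m3)
          have hb : csk_scan text.toList = 3 := by omega
          rw [if_pos m3, hb]
          rfl
        · rw [if_neg m3]
          have hne3 : csk_scan text.toList ≠ 3 := fun h3' => m3 <| by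
            rcases hcases with h | h
            · omega
            · exact (csk_match_iff_any text 3 (by omega)).mp (h3' ▸ h)
          by_cases m4 : ((csk_ruleOf 4).any (fun token => PySem.Str.isIn token text)) = true
          · have hle := csk_scan_le_of_match _ _ ((csk_match_iff_any text 4 (by omega)).mpr m4)
            have hb : csk_scan text.toList = 4 := by omega
            rw [if_pos m4, hb]
            rfl
          · rw [if_neg m4]
            have hne4 : csk_scan text.toList ≠ 4 := fun h4' => m4 <| by
              rcases hcases with h | h
              · omega
              · exact (csk_match_iff_any text 4 (by omega)).mp (h4' ▸ h)
            have hb : csk_scan text.toList = 5 := by omega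
            rw [hb]
            rfl

-- main equivalence
theorem csk_eq (first_message : Option String) :
    classify_session_kind first_message = classify_session_kind_alt first_message := by
  unfold classify_session_kind classify_session_kind_alt
  by_cases h0 : PySem.Str.lower (first_message.getD "") = ""
  · simp [h0]
  · simp only [if_neg h0]
    exact csk_chain_eq (PySem.Str.lower (first_message.getD ""))

-- ===== VERDICT (by name: the statement is the Claim_ definition above) =====
theorem classify_session_kind_spec : Claim_equal_classify_session_kind := by
  intro fm _
  exact csk_eq fm
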